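-- pv_equiv track=rewrite | github.com/Divyanshu7300/InterviewOS | backend/app/seed/seed_data.py | _build_seed_batches
-- ===== SOURCE A (Python) =====
-- SEED_BATCH_SIZE = 5
--
-- def _build_seed_batches(skills_meta: list[dict], chunk_size: int = SEED_BATCH_SIZE) -> dict[str, list[str]]:
--     batches: dict[str, list[str]] = {}
--     slugs = [item["slug"] for item in skills_meta]
--
--     for index in range(0, len(slugs), chunk_size):
--         batch_number = (index // chunk_size) + 1
--         batch_name = f"batch-{batch_number:02d}"
--         batches[batch_name] = slugs[index:index + chunk_size]
--
--     return batches
-- ===== SOURCE B (Python) =====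
-- SEED_BATCH_SIZE = 5
--
-- def _build_seed_batches(skills_meta: list[dict], chunk_size: int = SEED_BATCH_SIZE) -> dict[str, list[str]]:
--     batches: dict[str, list[str]] = {}
--     for i, item in enumerate(skills_meta):
--         batch_name = f"batch-{i // chunk_size + 1:02d}"
--         batches[batch_name] = batches.get(batch_name, []) + [item["slug"]]
--     return batches
-- ===== Notes on version B (the rewrite author's own statement) =====
-- stated objective: simpler
-- what changed: Instead of materializing the slug list and stepping over index ranges with slicing, B makes one pass with enumerate, computes each slug's batch key i//chunk_size+1 and appends it to the growing per-batch list.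
-- outside the precondition, e.g. on _build_seed_batches([{'slug': 'a'}], -1): A returns {}, B returns {'batch-01': ['a']}
import Mathlib
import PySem

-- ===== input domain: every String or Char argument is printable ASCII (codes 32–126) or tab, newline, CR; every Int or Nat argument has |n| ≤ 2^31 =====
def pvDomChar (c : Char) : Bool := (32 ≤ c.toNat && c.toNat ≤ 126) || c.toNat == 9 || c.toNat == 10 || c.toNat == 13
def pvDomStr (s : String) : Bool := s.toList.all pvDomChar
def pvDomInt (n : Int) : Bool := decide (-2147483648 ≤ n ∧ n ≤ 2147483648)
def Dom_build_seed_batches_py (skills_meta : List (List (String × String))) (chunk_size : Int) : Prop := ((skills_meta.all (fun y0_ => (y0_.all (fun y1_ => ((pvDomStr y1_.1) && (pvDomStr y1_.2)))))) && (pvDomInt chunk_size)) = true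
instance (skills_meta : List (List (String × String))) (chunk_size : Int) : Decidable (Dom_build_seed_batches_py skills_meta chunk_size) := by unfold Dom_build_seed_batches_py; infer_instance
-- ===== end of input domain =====

-- B replaces A's index-range-and-slice loop by a single enumerate pass that appends each slug
-- to the list of its computed batch key i // chunk_size + 1 (objective: simpler).

-- f"{n:02d}" = str(n).zfill(2); shared by both ports (both Pythons format with the same f-string)
def pvFmt02 (n : Int) : String := PySem.Str.zfill (PySem.Int.toStr n) 2

-- ===== PORT A =====
def build_seed_batches_py (skills_meta : List (List (String × String))) (chunk_size : Int) : List (String × List String) :=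
  -- item["slug"] is ported as get? + getD ""; the KeyError case (get? = none) is excluded by Pre_
  let slugs := skills_meta.map (fun item => ((PySem.Dict.mk item).get? "slug").getD "")
  ((PySem.List.pyRange 0 (slugs.length : Int) chunk_size).foldl
    (fun (batches : PySem.Dict String (List String)) index =>
      let batch_number := PySem.Int.floordiv index chunk_size + 1
      let batch_name := "batch-" ++ pvFmt02 batch_number
      batches.insert batch_name (PySem.List.slice slugs (some index) (some (index + chunk_size))))
    PySem.Dict.empty).items

-- ===== PORT B =====
def build_seed_batches_py_alt (skills_meta : List (List (String × String))) (chunk_size : Int) : List (String × List String) :=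
  ((PySem.List.enumerate skills_meta 0).foldl
    (fun (batches : PySem.Dict String (List String)) p =>
      let batch_name := "batch-" ++ pvFmt02 (PySem.Int.floordiv p.1 chunk_size + 1)
      batches.insert batch_name
        (batches.getD batch_name [] ++ [((PySem.Dict.mk p.2).get? "slug").getD ""]))
    PySem.Dict.empty).items

-- ===== PRECONDITION & SPEC =====
-- Pre_ excludes non-positive chunk_size — at 0 Python A raises ValueError (range step 0), and for a
-- negative chunk size A's empty range accidentally yields {} while B groups everything under batch 1,
-- a corner no caller specifies — and items without a "slug" key, on which A raises KeyError.
def Pre_build_seed_batches_py (skills_meta : List (List (String × String))) (chunk_size : Int) : Prop :=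
  1 ≤ chunk_size ∧ ∀ item ∈ skills_meta, ((PySem.Dict.mk item).get? "slug").isSome = true
instance (skills_meta : List (List (String × String))) (chunk_size : Int) : Decidable (Pre_build_seed_batches_py skills_meta chunk_size) := by unfold Pre_build_seed_batches_py; infer_instance
def pvWitness_build_seed_batches_py : (List (List (String × String))) × Int :=
  ([[("slug", "python")], [("slug", "sql")], [("slug", "react")]], 2)

def Spec_build_seed_batches_py (skills_meta : List (List (String × String))) (chunk_size : Int) (out : List (String × List String)) : Prop := out = build_seed_batches_py_alt skills_meta chunk_size
instance (skills_meta : List (List (String × String))) (chunk_size : Int) (out : List (String × List String)) : Decidable (Spec_build_seed_batches_py skills_meta chunk_size out) := by unfold Spec_build_seed_batches_py; infer_instance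

-- ===== CLAIM (what is proved, stated in full; the proofs are below) =====
def Claim_equal_build_seed_batches_py : Prop := ∀ (skills_meta : List (List (String × String))) (chunk_size : Int), Dom_build_seed_batches_py skills_meta chunk_size → Pre_build_seed_batches_py skills_meta chunk_size → Spec_build_seed_batches_py skills_meta chunk_size (build_seed_batches_py skills_meta chunk_size)

-- ===== LEMMAS AND PROOFS =====

theorem digitChar_inj (a b : Nat) (ha : a < 10) (hb : b < 10) (h : Nat.digitChar a = Nat.digitChar b) : a = b := by
  interval_cases a <;> interval_cases b <;> simp_all [Nat.digitChar]

theorem pvToDigits10_inj : ∀ a b : Nat, Nat.toDigits 10 a = Nat.toDigits 10 b → a = b := by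
  intro a
  induction a using Nat.strong_induction_on with
  | _ a ih =>
    intro b h
    rw [Nat.toDigits_eq_if (by norm_num), Nat.toDigits_eq_if (by norm_num) (n := b)] at h
    by_cases ha : a < 10 <;> by_cases hb : b < 10 <;> simp [ha, hb] at h
    · exact digitChar_inj a b ha hb h
    · have hp := Nat.length_toDigits_pos (b := 10) (n := b / 10)
      have hl := congrArg List.length h
      simp only [List.length_append, List.length_cons, List.length_nil] at hl
      omega
    · have hp := Nat.length_toDigits_pos (b := 10) (n := a / 10)
      have hl := congrArg List.length h
      simp only [List.length_append, List.length_cons, List.length_nil] at hl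
      omega
    · have hd : a / 10 = b / 10 := ih (a / 10) (by omega) _ h.1
      have hm : a % 10 = b % 10 :=
        digitChar_inj _ _ (Nat.mod_lt _ (by norm_num)) (Nat.mod_lt _ (by norm_num)) h.2
      omega

theorem pvToDigits10_head (n : Nat) (hn : 0 < n) :
    ∀ c cs, Nat.toDigits 10 n = c :: cs → c ≠ '0' := by
  induction n using Nat.strong_induction_on with
  | _ n ih =>
    intro c cs h
    rw [Nat.toDigits_eq_if (by norm_num)] at h
    by_cases hlt : n < 10
    · simp [hlt] at h
      intro hc
      subst hc
      interval_cases n <;> simp_all [Nat.digitChar]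
    · simp [hlt] at h
      have hp : 0 < n / 10 := by omega
      obtain ⟨c', cs', hcc⟩ : ∃ c' cs', Nat.toDigits 10 (n / 10) = c' :: cs' := by
        cases hh : Nat.toDigits 10 (n / 10) with
        | nil => have := Nat.length_toDigits_pos (b := 10) (n := n / 10); simp [hh] at this
        | cons x xs => exact ⟨x, xs, rfl⟩
      rw [hcc] at h
      simp at h
      rw [← h.1]
      exact ih (n / 10) (by omega) hp c' cs' hcc


theorem pvDigit_not_sign (c : Char) (hc : c.isDigit = true) : ¬(c = '+' ∨ c = '-') := by
  rintro (rfl | rfl) <;> exact absurd hc (by decide)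

theorem pvFmt02_inj' (m n : Int) (hm : 1 ≤ m) (hn : 1 ≤ n)
    (h : PySem.Str.zfill (PySem.Int.toStr m) 2 = PySem.Str.zfill (PySem.Int.toStr n) 2) : m = n := by
  have h' := congrArg String.toList h
  rw [PySem.Str.toList_zfill, PySem.Str.toList_zfill, PySem.Int.toList_toStr, PySem.Int.toList_toStr] at h'
  unfold PySem.Int.toChars at h'
  rw [if_neg (by omega), if_neg (by omega)] at h'
  -- now: Chars.zfill (toDigits 10 m.toNat) 2 = Chars.zfill (toDigits 10 n.toNat) 2
  have key : ∀ a b : Nat, 0 < a → 0 < b →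
      PySem.Chars.zfill (Nat.toDigits 10 a) 2 = PySem.Chars.zfill (Nat.toDigits 10 b) 2 → a = b := by
    intro a b ha hb hz
    unfold PySem.Chars.zfill at hz
    have la := Nat.length_toDigits_pos (b := 10) (n := a)
    have lb := Nat.length_toDigits_pos (b := 10) (n := b)
    by_cases h2a : (2:Int) ≤ (Nat.toDigits 10 a).length <;> by_cases h2b : (2:Int) ≤ (Nat.toDigits 10 b).length
    · rw [if_pos h2a, if_pos h2b] at hz; exact pvToDigits10_inj _ _ hz
    · -- a long, b short: toDigits b = [d], padded = ['0', d]; heads differ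
      rw [if_pos h2a, if_neg h2b] at hz
      obtain ⟨c', cs', hcc⟩ : ∃ c' cs', Nat.toDigits 10 a = c' :: cs' := by
        cases hh : Nat.toDigits 10 a with
        | nil => simp [hh] at la
        | cons x xs => exact ⟨x, xs, rfl⟩
      have hb1 : (Nat.toDigits 10 b).length = 1 := by omega
      obtain ⟨d, hd⟩ : ∃ d, Nat.toDigits 10 b = [d] := by
        cases hh : Nat.toDigits 10 b with
        | nil => simp [hh] at lb
        | cons x xs => rw [hh] at hb1; simp at hb1; exact ⟨x, by simp [hb1]⟩
      rw [hcc, hd] at hz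
      simp at hz
      have hmem : d ∈ Nat.toDigits 10 b := by rw [hd]; exact List.mem_singleton_self d
      have hsd : ¬(d = '+' ∨ d = '-') :=
        pvDigit_not_sign d (Nat.isDigit_of_mem_toDigits (by norm_num) (by norm_num) hmem)
      rw [if_neg hsd] at hz
      simp at hz
      exact absurd hz.1 (pvToDigits10_head a ha c' cs' hcc)
    · rw [if_neg h2a, if_pos h2b] at hz
      obtain ⟨c', cs', hcc⟩ : ∃ c' cs', Nat.toDigits 10 b = c' :: cs' := by
        cases hh : Nat.toDigits 10 b with
        | nil => simp [hh] at lb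
        | cons x xs => exact ⟨x, xs, rfl⟩
      have ha1 : (Nat.toDigits 10 a).length = 1 := by omega
      obtain ⟨d, hd⟩ : ∃ d, Nat.toDigits 10 a = [d] := by
        cases hh : Nat.toDigits 10 a with
        | nil => simp [hh] at la
        | cons x xs => rw [hh] at ha1; simp at ha1; exact ⟨x, by simp [ha1]⟩
      rw [hcc, hd] at hz
      simp at hz
      have hmem : d ∈ Nat.toDigits 10 a := by rw [hd]; exact List.mem_singleton_self d
      have hsd : ¬(d = '+' ∨ d = '-') :=
        pvDigit_not_sign d (Nat.isDigit_of_mem_toDigits (by norm_num) (by norm_num) hmem)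
      rw [if_neg hsd] at hz
      simp at hz
      exact absurd hz.1.symm (pvToDigits10_head b hb c' cs' hcc)
    · rw [if_neg h2a, if_neg h2b] at hz
      have ha1 : (Nat.toDigits 10 a).length = 1 := by omega
      have hb1 : (Nat.toDigits 10 b).length = 1 := by omega
      obtain ⟨da, hda⟩ : ∃ d, Nat.toDigits 10 a = [d] := by
        cases hh : Nat.toDigits 10 a with
        | nil => simp [hh] at la
        | cons x xs => rw [hh] at ha1; simp at ha1; exact ⟨x, by simp [ha1]⟩
      obtain ⟨db, hdb⟩ : ∃ d, Nat.toDigits 10 b = [d] := by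
        cases hh : Nat.toDigits 10 b with
        | nil => simp [hh] at lb
        | cons x xs => rw [hh] at hb1; simp at hb1; exact ⟨x, by simp [hb1]⟩
      rw [hda, hdb] at hz
      simp at hz
      have hmema : da ∈ Nat.toDigits 10 a := by rw [hda]; exact List.mem_singleton_self da
      have hsd : ¬(da = '+' ∨ da = '-') :=
        pvDigit_not_sign da (Nat.isDigit_of_mem_toDigits (by norm_num) (by norm_num) hmema)
      rw [if_neg hsd] at hz
      have hmemb : db ∈ Nat.toDigits 10 b := by rw [hdb]; exact List.mem_singleton_self db
      have hsd2 : ¬(db = '+' ∨ db = '-') :=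
        pvDigit_not_sign db (Nat.isDigit_of_mem_toDigits (by norm_num) (by norm_num) hmemb)
      rw [if_neg hsd2] at hz
      simp at hz
      exact pvToDigits10_inj _ _ (by rw [hda, hdb]; simp [hz])
  have := key m.toNat n.toNat (by omega) (by omega) h'
  omega

theorem pvName_inj (m n : Int) (hm : 1 ≤ m) (hn : 1 ≤ n)
    (h : "batch-" ++ pvFmt02 m = "batch-" ++ pvFmt02 n) : m = n := by
  have h' := congrArg String.toList h
  simp only [String.toList_append] at h'
  exact pvFmt02_inj' m n hm hn (String.toList_inj.mp (List.append_cancel_left h'))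

-- proof helpers
def pvNm (q : Nat) : String := "batch-" ++ pvFmt02 ((q : Int) + 1)
def pvSlug (item : List (String × String)) : String := ((PySem.Dict.mk item).get? "slug").getD ""

theorem pvNm_inj (j q : Nat) (h : pvNm j = pvNm q) : j = q := by
  have := pvName_inj ((j:Int)+1) ((q:Int)+1) (by omega) (by omega) h
  omega

-- B's fold over one block of same-key items
theorem pvBlock (cn q : Nat) :
    ∀ (blk : List (List (String × String))) (i0 : Nat) (d : PySem.Dict String (List String)),
      blk ≠ [] →
      (∀ t : Nat, t < blk.length → (i0 + t) / cn = q) →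
      (PySem.List.enumerate blk (i0 : Int)).foldl
        (fun batches p =>
          let batch_name := "batch-" ++ pvFmt02 (PySem.Int.floordiv p.1 (cn : Int) + 1)
          batches.insert batch_name (batches.getD batch_name [] ++ [pvSlug p.2])) d
      = d.insert (pvNm q) (d.getD (pvNm q) [] ++ blk.map pvSlug) := by
  intro blk
  induction blk with
  | nil => intro _ _ h; exact absurd rfl h
  | cons x xs ih =>
    intro i0 d _ hkey
    rw [PySem.List.enumerate_cons]
    simp only [List.foldl_cons]
    have hk0 : PySem.Int.floordiv (i0 : Int) (cn : Int) + 1 = (q : Int) + 1 := by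
      rw [PySem.Int.floordiv_natCast]
      have := hkey 0 (by simp)
      simp at this
      omega
    rw [hk0]
    by_cases hxs : xs = []
    · subst hxs
      simp [PySem.List.enumerate_nil, pvNm]
    · have hstep : ((i0 : Int) + 1) = ((i0 + 1 : Nat) : Int) := by push_cast; ring
      rw [hstep, ih (i0 + 1) _ hxs (by
        intro t ht
        have he : i0 + 1 + t = i0 + (t + 1) := by omega
        rw [he]
        exact hkey (t + 1) (by simp; omega))]
      rw [show ("batch-" ++ pvFmt02 ((q:Int) + 1)) = pvNm q from rfl]
      rw [PySem.Dict.getD_insert_self, PySem.Dict.insert_insert_self]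
      simp

-- main block induction: A's remaining range'-fold equals B's remaining enumerate-fold
theorem pvMain (sm : List (List (String × String))) (cn : Nat) (hc : 0 < cn) :
    ∀ (r q : Nat) (d : PySem.Dict String (List String)),
      sm.length ≤ (q + r) * cn →
      (r ≠ 0 → (q + r - 1) * cn < sm.length) →
      (∀ j : Nat, q ≤ j → d.contains (pvNm j) = false) →
      (List.range' q r).foldl
        (fun batches k =>
          let index : Int := ((k * cn : Nat) : Int)
          let batch_name := "batch-" ++ pvFmt02 (PySem.Int.floordiv index (cn : Int) + 1)
          batches.insert batch_name
            (PySem.List.slice (sm.map pvSlug) (some index) (some (index + (cn : Int))))) d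
      = (PySem.List.enumerate (sm.drop (q * cn)) ((q * cn : Nat) : Int)).foldl
          (fun batches p =>
            let batch_name := "batch-" ++ pvFmt02 (PySem.Int.floordiv p.1 (cn : Int) + 1)
            batches.insert batch_name (batches.getD batch_name [] ++ [pvSlug p.2])) d := by
  intro r
  induction r with
  | zero =>
    intro q d hcov _ _
    have hdrop : sm.drop (q * cn) = [] := by
      rw [List.drop_eq_nil_iff]
      simpa using hcov
    simp [hdrop, PySem.List.enumerate_nil]
  | succ rs ih =>
    intro q d hcov hlast hfresh
    have h1 : (q + rs) * cn < sm.length := by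
      have := hlast (Nat.succ_ne_zero rs)
      have he : q + (rs + 1) - 1 = q + rs := by omega
      rwa [he] at this
    have hq_le : q * cn ≤ (q + rs) * cn := Nat.mul_le_mul_right cn (by omega)
    have hqcn : q * cn < sm.length := lt_of_le_of_lt hq_le h1
    rw [List.range'_succ, List.foldl_cons]
    have hkeyA : PySem.Int.floordiv ((q * cn : Nat) : Int) (cn : Int) + 1 = (q : Int) + 1 := by
      rw [PySem.Int.floordiv_natCast, Nat.mul_div_cancel _ hc]
    have hsliceA : PySem.List.slice (sm.map pvSlug) (some ((q * cn : Nat) : Int))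
        (some (((q * cn : Nat) : Int) + (cn : Int)))
        = ((sm.drop (q * cn)).take cn).map pvSlug := by
      rw [PySem.List.slice_natCast_add, List.map_take, List.map_drop]
    simp only [hkeyA, hsliceA]
    set blk := (sm.drop (q * cn)).take cn with hblk
    have hsplit : sm.drop (q * cn) = blk ++ (sm.drop ((q + 1) * cn)) := by
      have h0 := (List.take_append_drop cn (sm.drop (q * cn))).symm
      rw [List.drop_drop] at h0
      have hm : (q + 1) * cn = q * cn + cn := by ring
      rw [hblk, hm]
      exact h0
    have hblk_ne : blk ≠ [] := by
      rw [hblk]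
      intro h
      rw [List.take_eq_nil_iff] at h
      rcases h with h | h
      · omega
      · rw [List.drop_eq_nil_iff] at h; omega
    rw [hsplit, PySem.List.enumerate_append, List.foldl_append]
    rw [pvBlock cn q blk (q * cn) d hblk_ne (by
      intro t ht
      have htc : t < cn := lt_of_lt_of_le ht (by rw [hblk]; exact List.length_take_le _ _)
      rw [Nat.add_comm, Nat.add_mul_div_right _ _ hc, Nat.div_eq_of_lt htc]
      omega)]
    rw [PySem.Dict.getD_of_not_contains _ _ (hfresh q le_rfl)]
    rw [List.nil_append]
    have hstart : PySem.List.enumerate (sm.drop ((q + 1) * cn)) (((q * cn : Nat) : Int) + (blk.length : Int))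
        = PySem.List.enumerate (sm.drop ((q + 1) * cn)) (((q + 1) * cn : Nat) : Int) := by
      by_cases hrest : sm.drop ((q + 1) * cn) = []
      · rw [hrest, PySem.List.enumerate_nil, PySem.List.enumerate_nil]
      · have hlt : (q + 1) * cn < sm.length := by
          rw [List.drop_eq_nil_iff] at hrest
          omega
        have hm : (q + 1) * cn = q * cn + cn := by ring
        have hlen : blk.length = cn := by
          rw [hblk, List.length_take, List.length_drop]
          omega
        rw [hlen]
        congr 1
        push_cast
        ring
    rw [hstart]
    have hd' : ∀ j : Nat, q + 1 ≤ j →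
        (d.insert ("batch-" ++ pvFmt02 ((q : Int) + 1)) (blk.map pvSlug)).contains (pvNm j) = false := by
      intro j hj
      rw [show ("batch-" ++ pvFmt02 ((q : Int) + 1)) = pvNm q from rfl]
      rw [PySem.Dict.contains_insert]
      have hne : (pvNm j == pvNm q) = false :=
        beq_eq_false_iff_ne.mpr (fun h => by have := pvNm_inj j q h; omega)
      rw [hne, hfresh j (by omega), Bool.or_self]
    have hcov' : sm.length ≤ (q + 1 + rs) * cn := by
      have he : q + 1 + rs = q + rs + 1 := by omega
      rw [he]
      calc sm.length ≤ (q + rs) * cn + cn := by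
            have hx : (q + (rs + 1)) * cn = (q + rs) * cn + cn := by ring
            omega
        _ = (q + rs + 1) * cn := by ring
    have hlast' : rs ≠ 0 → (q + 1 + rs - 1) * cn < sm.length := by
      intro _
      have he : q + 1 + rs - 1 = q + rs := by omega
      rw [he]
      exact h1
    exact ih (q + 1) _ hcov' hlast' hd'

theorem pvTop (sm : List (List (String × String))) (chunk_size : Int) (hcs : 1 ≤ chunk_size) :
    build_seed_batches_py sm chunk_size = build_seed_batches_py_alt sm chunk_size := by
  obtain ⟨cn, rfl, hc⟩ : ∃ cn : Nat, chunk_size = (cn : Int) ∧ 0 < cn :=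
    ⟨chunk_size.toNat, by omega, by omega⟩
  unfold build_seed_batches_py build_seed_batches_py_alt
  apply congrArg PySem.Dict.items
  simp only [List.length_map]
  rw [PySem.List.pyRange_of_pos 0 (sm.length : Int) (by exact_mod_cast hc)]
  rw [List.foldl_map]
  have hidx : ∀ k : Nat, (0 : Int) + (cn : Int) * (k : Int) = ((k * cn : Nat) : Int) := by
    intro k; push_cast; ring
  simp only [hidx]
  set n := sm.length with hn
  set K := (n + cn - 1) / cn with hK
  have hNK : (if (0:Int) < (n:Int) then (((n:Int) - 0 + (cn:Int) - 1) / (cn:Int)).toNat else 0) = K := by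
    by_cases h0 : (0:Int) < (n:Int)
    · rw [if_pos h0]
      have he : ((n:Int) - 0 + (cn:Int) - 1) = ((n + cn - 1 : Nat) : Int) := by
        have : 1 ≤ n + cn := by omega
        push_cast [this]
        omega
      rw [he, ← Int.natCast_div, Int.toNat_natCast]
    · rw [if_neg h0]
      have hn0 : n = 0 := by omega
      rw [hK, hn0, Nat.zero_add, Nat.div_eq_of_lt (by omega)]
  rw [hNK, List.range_eq_range']
  -- ceiling facts
  have hdm := Nat.div_add_mod (n + cn - 1) cn
  have hmlt : (n + cn - 1) % cn < cn := Nat.mod_lt _ hc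
  have hcov : n ≤ (0 + K) * cn := by
    have h1 : (0 + K) * cn = cn * K := by ring
    rw [h1]
    rw [← hK] at hdm
    generalize hP : cn * K = P at hdm ⊢
    omega
  have hlast : K ≠ 0 → (0 + K - 1) * cn < n := by
    intro hK0
    obtain ⟨K', hK'⟩ : ∃ K', K = K' + 1 := ⟨K - 1, by omega⟩
    have h2 : (0 + K - 1) * cn = cn * K' := by
      rw [hK']
      have he : 0 + (K' + 1) - 1 = K' := by omega
      rw [he]; ring
    rw [h2]
    rw [← hK, hK'] at hdm
    have h3 : cn * (K' + 1) = cn * K' + cn := by ring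
    rw [h3] at hdm
    generalize hP : cn * K' = P at hdm ⊢
    omega
  have := pvMain sm cn hc K 0 PySem.Dict.empty (by simpa using hcov) (by simpa using hlast)
    (fun j _ => PySem.Dict.contains_empty _)
  simp only [Nat.zero_mul, List.drop_zero, Nat.cast_zero] at this
  exact this

-- ===== VERDICT (by name: the statement is the Claim_ definition above) =====
theorem build_seed_batches_py_spec : Claim_equal_build_seed_batches_py := by
  intro skills_meta chunk_size _ hpre
  unfold Spec_build_seed_batches_py
  exact pvTop skills_meta chunk_size hpre.1
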